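-- pv_equiv track=rewrite | github.com/LoliKonch/MOZI | Lab12/No1.py | polyMult
-- ===== SOURCE A (Python) =====
-- def polyMult(n1, n2):
--     preResult = []
--     result = []
--     for i in range(len(n1)):
--         for k in range(len(n2)):
--             if n1[i] == '1' and n2[k] == '1':
--                 preResult.append(len(n1) + len(n2) - 2 - i - k)
--
--     for i in range(N - 1):
--         if preResult.count(i) % 2 == 1:
--             result.append(i)
--     return result
--
-- N = 16
-- ===== SOURCE B (Python) =====
-- N = 16
--
-- def polyMult(n1, n2):
--     # Carry-less (GF(2)) multiplication on integer bitmasks: encode n2 as a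
--     # binary number, XOR shifted copies of it into p (XOR = mod-2 parity),
--     # then read the low N-1 bits of p.
--     v2 = 0
--     for c in n2:
--         v2 = (v2 << 1) | (1 if c == '1' else 0)
--     p = 0
--     for i, c in enumerate(n1):
--         if c == '1':
--             p ^= v2 << (len(n1) - 1 - i)
--     res = []
--     for i in range(N - 1):
--         if (p >> i) & 1:
--             res.append(i)
--     return res
-- ===== Notes on version B (the rewrite author's own statement) =====
-- stated objective: faster
-- what changed: B performs carry-less multiplication on integer bitmasks: it encodes n2 as a binary number, XORs shifted copies of it into a single accumulator (XOR tracks mod-2 parity), and reads the low N-1 bits, instead of A's enumeration of all '1'x'1' index pairs into a list rescanned with list.count for every exponent.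
import Mathlib
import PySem

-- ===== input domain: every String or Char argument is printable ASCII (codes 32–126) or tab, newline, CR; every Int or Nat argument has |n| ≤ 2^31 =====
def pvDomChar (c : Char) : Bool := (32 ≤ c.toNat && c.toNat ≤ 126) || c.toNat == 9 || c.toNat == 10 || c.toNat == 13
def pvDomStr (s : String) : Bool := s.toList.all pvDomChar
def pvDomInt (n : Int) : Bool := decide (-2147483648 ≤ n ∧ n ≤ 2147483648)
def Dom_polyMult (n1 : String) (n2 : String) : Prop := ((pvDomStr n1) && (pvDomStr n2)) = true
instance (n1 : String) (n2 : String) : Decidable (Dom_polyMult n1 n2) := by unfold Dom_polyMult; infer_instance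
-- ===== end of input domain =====

-- B replaces A's pair-list + repeated list.count scans by carry-less multiplication on
-- integer bitmasks (XOR of shifted copies), reading the low N-1 bits at the end.

-- ===== PORT A =====
-- preResult built by the nested loops exactly as in A
def pvPreA (c1 c2 : List Char) : List Int :=
  (List.range c1.length).foldl (fun pre i =>
    (List.range c2.length).foldl (fun pre k =>
      if (c1.getD i ' ' == '1') && (c2.getD k ' ' == '1') then
        pre ++ [(c1.length : Int) + (c2.length : Int) - 2 - (i : Int) - (k : Int)]
      else pre) pre) []

def polyMult (n1 : String) (n2 : String) : List Int :=
  let pre := pvPreA n1.toList n2.toList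
  (List.range 15).foldl (fun res (i : Nat) =>
    if pre.count ((i : Nat) : Int) % 2 = 1 then res ++ [((i : Nat) : Int)] else res) []

-- ===== PORT B =====
-- v2 = 0; for c in n2: v2 = (v2 << 1) | (1 if c == '1' else 0)
def pvBitsB (c2 : List Char) : Nat :=
  c2.foldl (fun v c => (v <<< 1) ||| (if c == '1' then 1 else 0)) 0

-- p = 0; for i, c in enumerate(n1): if c == '1': p ^= v2 << (len(n1) - 1 - i)
def pvClmulB (c1 : List Char) (v2 : Nat) : Nat :=
  (List.range c1.length).foldl (fun p i =>
    if c1.getD i ' ' == '1' then p ^^^ (v2 <<< (c1.length - 1 - i)) else p) 0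

def polyMult_alt (n1 : String) (n2 : String) : List Int :=
  let v2 := pvBitsB n2.toList
  let p := pvClmulB n1.toList v2
  (List.range 15).foldl (fun res (i : Nat) =>
    if (p >>> i) &&& 1 == 1 then res ++ [((i : Nat) : Int)] else res) []

-- ===== PRECONDITION & SPEC =====
def Spec_polyMult (n1 : String) (n2 : String) (out : List Int) : Prop := out = polyMult_alt n1 n2
instance (n1 : String) (n2 : String) (out : List Int) : Decidable (Spec_polyMult n1 n2 out) := by unfold Spec_polyMult; infer_instance

-- ===== CLAIM (what is proved, stated in full; the proofs are below) =====
def Claim_equal_polyMult : Prop := ∀ (n1 : String) (n2 : String), Dom_polyMult n1 n2 → Spec_polyMult n1 n2 (polyMult n1 n2)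

-- ===== LEMMAS AND PROOFS =====

-- the exponents contributed by '1'-bit i of c1 (A's inner loop for that i, in order)
def pvContrib (c1 c2 : List Char) (i : Nat) : List Int :=
  if c1.getD i ' ' == '1' then
    ((List.range c2.length).filter (fun k => c2.getD k ' ' == '1')).map
      (fun (k : Nat) => (c1.length : Int) + (c2.length : Int) - 2 - (i : Int) - (k : Int))
  else []

-- the XOR term contributed by '1'-bit i of c1 (B's loop body for that i)
def pvTerm (c1 : List Char) (v2 : Nat) (i : Nat) : Nat :=
  if c1.getD i ' ' == '1' then v2 <<< (c1.length - 1 - i) else 0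

theorem pvFoldlId {A B : Type} (l : List B) (x : A) : l.foldl (fun a _ => a) x = x := by
  induction l generalizing x with
  | nil => rfl
  | cons _ _ ih => exact ih x

theorem pvPreA_eq_flatMap (c1 c2 : List Char) :
    pvPreA c1 c2 = (List.range c1.length).flatMap (pvContrib c1 c2) := by
  unfold pvPreA
  rw [PySem.List.foldl_congr_mem (List.range c1.length) _
      (fun pre i => pre ++ pvContrib c1 c2 i) []
      (by
        intro acc i _
        unfold pvContrib
        by_cases h : c1.getD i ' ' == '1'
        · simp only [h, Bool.true_and, if_true]
          rw [PySem.List.foldl_append_if]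
        · simp only [h, Bool.false_and, Bool.false_eq_true, if_false, List.append_nil]
          exact pvFoldlId _ _)]
  rw [PySem.List.foldl_append_eq_flatMap, List.nil_append]

theorem pvClmulB_eq_fold (c1 : List Char) (v2 : Nat) :
    pvClmulB c1 v2 = (List.range c1.length).foldl (fun p i => p ^^^ pvTerm c1 v2 i) 0 := by
  unfold pvClmulB
  apply PySem.List.foldl_congr_mem
  intro p i _
  unfold pvTerm
  split <;> simp_all

-- bits of v2: bit j is set iff character m-1-j of c2 is '1'
theorem pvBitsB_testBit (c2 : List Char) (j : Nat) :
    (pvBitsB c2).testBit j =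
      (decide (j < c2.length) && (c2.getD (c2.length - 1 - j) ' ' == '1')) := by
  induction c2 using List.reverseRecOn generalizing j with
  | nil => simp [pvBitsB]
  | append_singleton cs c ih =>
    have hb : pvBitsB (cs ++ [c]) = ((pvBitsB cs) <<< 1) ||| (if c == '1' then 1 else 0) := by
      simp [pvBitsB, List.foldl_append]
    have hsmall : ∀ j' : Nat, (if c == '1' then 1 else 0).testBit (j' + 1) = false := by
      intro j'
      apply Nat.testBit_lt_two_pow
      calc (if c == '1' then 1 else 0) < 2 ^ 1 := by split <;> omega
        _ ≤ 2 ^ (j' + 1) := Nat.pow_le_pow_right (by omega) (by omega)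
    rw [hb]
    cases j with
    | zero =>
      have hg : (cs ++ [c]).getD ((cs ++ [c]).length - 1 - 0) ' ' = c := by
        simp [List.getD_eq_getElem?_getD]
      rw [hg]
      simp only [Nat.testBit_or, Nat.testBit_shiftLeft]
      simp
      split <;> simp_all
    | succ j =>
      rw [Nat.testBit_or, hsmall j, Bool.or_false, Nat.testBit_shiftLeft]
      have h1 : (1 ≤ j + 1) := by omega
      simp only [h1, decide_true, Bool.true_and, Nat.add_sub_cancel]
      rw [ih j]
      by_cases hj : j < cs.length
      · have hlen : j + 1 < (cs ++ [c]).length := by simp; omega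
        have hlt : cs.length - 1 - j < cs.length := by omega
        have hg : (cs ++ [c]).getD ((cs ++ [c]).length - 1 - (j + 1)) ' ' =
            cs.getD (cs.length - 1 - j) ' ' := by
          have hidx : (cs ++ [c]).length - 1 - (j + 1) = cs.length - 1 - j := by simp; omega
          rw [hidx]
          simp [List.getD_eq_getElem?_getD, List.getElem?_append_left hlt]
        rw [hg]
        simp [hj]
      · have hlen : ¬ (j + 1 < (cs ++ [c]).length) := by simp; omega
        simp [hj]

-- a countP over range m whose predicate pins its argument to k0
theorem pvCountP_range_pin (m k0 : Nat) (pred : Nat → Bool)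
    (hpin : ∀ k, pred k = true → k = k0) :
    (List.range m).countP pred = if k0 < m ∧ pred k0 = true then 1 else 0 := by
  induction m with
  | zero => simp
  | succ m ih =>
    rw [List.range_succ, List.countP_append, ih]
    by_cases hm : pred m = true
    · have hk := hpin m hm
      subst hk
      simp [hm]
    · have h1 : List.countP pred [m] = 0 := by simp [hm]
      rw [h1, Nat.add_zero]
      by_cases hk : pred k0 = true
      · have hne : k0 ≠ m := fun h => hm (h ▸ hk)
        split_ifs with ha hb hb
        · rfl
        · exact absurd ⟨by omega, hk⟩ hb
        · exact absurd ⟨by omega, hk⟩ ha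
        · rfl
      · simp [hk]

-- per-index agreement: bit e of B's term = parity of e's multiplicity in A's contribution
theorem pvTerm_testBit (c1 c2 : List Char) (i e : Nat) (hi : i < c1.length) :
    (pvTerm c1 (pvBitsB c2) i).testBit e =
      decide ((pvContrib c1 c2 i).count (e : Int) % 2 = 1) := by
  unfold pvTerm pvContrib
  by_cases hc : c1.getD i ' ' == '1'
  · simp only [hc, if_true]
    rw [Nat.testBit_shiftLeft, pvBitsB_testBit]
    have hcnt : ((((List.range c2.length).filter (fun k => c2.getD k ' ' == '1')).map
        (fun (k : Nat) => (c1.length : Int) + (c2.length : Int) - 2 - (i : Int) - (k : Int))).count (e : Int)) =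
        (List.range c2.length).countP (fun (k : Nat) =>
          ((c1.length : Int) + (c2.length : Int) - 2 - (i : Int) - (k : Int) == (e : Int)) &&
          (c2.getD k ' ' == '1')) := by
      rw [List.count, List.countP_map, List.countP_filter]
      simp only [Function.comp_def]
    set n := c1.length
    set m := c2.length
    set k0 : Nat := ((n : Int) + (m : Int) - 2 - (i : Int) - (e : Int)).toNat with hk0
    have hpin : ∀ k : Nat, ((((n : Int) + (m : Int) - 2 - (i : Int) - (k : Int) == (e : Int)) &&
        (c2.getD k ' ' == '1')) = true) → k = k0 := by
      intro k hk
      simp only [Bool.and_eq_true, beq_iff_eq] at hk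
      omega
    rw [hcnt, pvCountP_range_pin m k0 _ hpin]
    by_cases h1 : n - 1 - i ≤ e
    · by_cases h2 : e - (n - 1 - i) < m
      · have hidx : m - 1 - (e - (n - 1 - i)) = k0 := by omega
        have hf : ((n : Int) + (m : Int) - 2 - (i : Int) - (k0 : Int) == (e : Int)) = true := by
          simp only [beq_iff_eq]; omega
        have hk0m : k0 < m := by omega
        rw [hidx]
        simp [h1, h2, hf, hk0m]
        by_cases hq : c2[k0]?.getD ' ' = '1' <;> simp [hq]
      · have hnot : ¬ (k0 < m ∧ ((((n : Int) + (m : Int) - 2 - (i : Int) - (k0 : Int) == (e : Int)) &&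
            (c2.getD k0 ' ' == '1')) = true)) := by
          rintro ⟨hm, hp⟩
          simp only [Bool.and_eq_true, beq_iff_eq] at hp
          omega
        simp [h2]
        simp only [Bool.and_eq_true, beq_iff_eq, List.getD_eq_getElem?_getD] at hnot
        rw [if_neg hnot]
    · have hnot : ¬ (k0 < m ∧ ((((n : Int) + (m : Int) - 2 - (i : Int) - (k0 : Int) == (e : Int)) &&
          (c2.getD k0 ' ' == '1')) = true)) := by
        rintro ⟨hm, hp⟩
        simp only [Bool.and_eq_true, beq_iff_eq] at hp
        omega
      simp [h1]
      simp only [Bool.and_eq_true, beq_iff_eq, List.getD_eq_getElem?_getD] at hnot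
      rw [if_neg hnot]
  · rw [if_neg hc, if_neg hc]
    simp

-- fold an xor-accumulating loop out of its accumulator
theorem pvFoldXor_hoist (l : List Nat) (t : Nat → Nat) (p0 : Nat) :
    l.foldl (fun p i => p ^^^ t i) p0 = p0 ^^^ l.foldl (fun p i => p ^^^ t i) 0 := by
  induction l generalizing p0 with
  | nil => simp
  | cons a l ih =>
    simp only [List.foldl_cons]
    rw [ih (p0 ^^^ t a), ih (0 ^^^ t a), Nat.zero_xor, Nat.xor_assoc]

-- main bridge: bit e of the XOR accumulation = parity of e's count in the pair list
theorem pvMain (c1 c2 : List Char) (e : Nat) (l : List Nat) (hl : ∀ i ∈ l, i < c1.length) :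
    (l.foldl (fun p i => p ^^^ pvTerm c1 (pvBitsB c2) i) 0).testBit e =
      decide ((l.flatMap (pvContrib c1 c2)).count (e : Int) % 2 = 1) := by
  induction l with
  | nil => simp
  | cons a l ih =>
    simp only [List.foldl_cons, List.flatMap_cons, Nat.zero_xor]
    rw [pvFoldXor_hoist, Nat.testBit_xor, List.count_append,
      ih (fun i hi => hl i (List.mem_cons_of_mem _ hi)),
      pvTerm_testBit c1 c2 a e (hl a List.mem_cons_self)]
    by_cases h1 : (pvContrib c1 c2 a).count (e : Int) % 2 = 1 <;>
      by_cases h2 : (l.flatMap (pvContrib c1 c2)).count (e : Int) % 2 = 1 <;>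
      simp [h1, h2] <;> omega

-- (x >> i) & 1 == 1 is exactly testBit
theorem pvAndOne_testBit (x i : Nat) : ((x >>> i) &&& 1 == 1) = x.testBit i := by
  simp [Nat.testBit, Nat.and_one_is_mod, Nat.one_and_eq_mod_two]

-- ===== VERDICT (by name: the statement is the Claim_ definition above) =====
theorem polyMult_spec : Claim_equal_polyMult := by
  intro n1 n2 _
  unfold Spec_polyMult polyMult polyMult_alt
  apply PySem.List.foldl_congr_mem
  intro acc i _
  rw [pvAndOne_testBit, pvClmulB_eq_fold,
    pvMain n1.toList n2.toList i (List.range n1.toList.length)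
      (fun j hj => List.mem_range.mp hj), pvPreA_eq_flatMap]
  exact if_congr (by simp) rfl rfl
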